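-- pv_equiv track=rewrite | github.com/miliar/Code_Jam_Webscraper | solutions_python/Problem_117/558.py | check
-- ===== SOURCE A (Python) =====
-- def check(mat, w, h):
-- 	bit = []
-- 	for j in range(int(w)):
-- 		tmp = []
-- 		for k in range(int(h)):
-- 			tmp.append(False)
-- 		bit.append(tmp)
-- 	for j in range(int(w)):
-- 		for k in range(int(h)):
-- 			if not bit[j][k]:
-- 				d = int(mat[j][k])
-- 				valid1 = True
-- 				for x in range(int(h)):
-- 					if int(mat[j][x]) > d:
-- 						valid1 = False
-- 						break
-- 				valid2 = True
-- 				for y in range(int(w)):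
-- 					if int(mat[y][k]) > d:
-- 						valid2 = False
-- 						break
-- 				if valid1:
-- 					for x in range(int(h)):
-- 						if int(mat[j][x]) == d:
-- 							bit[j][x] = True
-- 				if valid2:
-- 					for y in range(int(w)):
-- 						if int(mat[y][k]) == d:
-- 							bit[y][k] = True
-- 				if not valid1 and not valid2:
-- 					return False
-- 	return True
-- ===== SOURCE B (Python) =====
-- def check(mat, w, h):
--     w, h = int(w), int(h)
--     if w <= 0 or h <= 0:
--         return True
--     rows = [[int(mat[j][k]) for k in range(h)] for j in range(w)]
--     row_max = [max(r) for r in rows]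
--     col_max = [max(rows[j][k] for j in range(w)) for k in range(h)]
--     return all(rows[j][k] == row_max[j] or rows[j][k] == col_max[k]
--                for j in range(w) for k in range(h))
-- ===== Notes on version B (the rewrite author's own statement) =====
-- stated objective: alternative
-- what changed: B precomputes the maximum of each row and each column once and tests every cell against them in O(1), replacing A's per-cell rescans of its row and column plus the bit-marking bookkeeping.
-- outside the precondition, e.g. on check([[0, 5], [5, 0]], 3, 2): A returns False, B raises IndexError
import Mathlib
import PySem

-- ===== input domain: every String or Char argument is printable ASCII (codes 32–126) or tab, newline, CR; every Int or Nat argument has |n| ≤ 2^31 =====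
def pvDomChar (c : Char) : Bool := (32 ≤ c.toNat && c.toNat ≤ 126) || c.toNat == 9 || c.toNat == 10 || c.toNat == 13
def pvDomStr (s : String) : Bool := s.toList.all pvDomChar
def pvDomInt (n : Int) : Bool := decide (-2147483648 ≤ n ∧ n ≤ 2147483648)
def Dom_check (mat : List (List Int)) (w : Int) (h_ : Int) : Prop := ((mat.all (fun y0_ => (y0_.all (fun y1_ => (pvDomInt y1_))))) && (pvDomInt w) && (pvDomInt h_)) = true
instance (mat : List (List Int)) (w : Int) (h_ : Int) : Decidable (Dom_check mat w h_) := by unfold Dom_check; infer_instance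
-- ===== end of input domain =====

-- B replaces A's per-cell row/column rescans (with bit-marking) by precomputed row/column maxima and an O(1) test per cell (an alternative algorithm; a timing run could not credit speed, so none is claimed).


-- ===== PORT A =====
-- mat[j][k]: under Pre_check every access is in range, so this defaulting getter is exact there
def g (mat : List (List Int)) (j k : Nat) : Int := (mat.getD j []).getD k 0

def setRow : List Bool → Nat → List Bool
  | [], _ => []
  | _ :: bs, 0 => true :: bs
  | b :: bs, k + 1 => b :: setRow bs k

-- bit[j][k] = True
def bitSet : List (List Bool) → Nat → Nat → List (List Bool)
  | [], _, _ => []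
  | r :: rs, 0, k => setRow r k :: rs
  | r :: rs, j + 1, k => r :: bitSet rs j k

def bitGet (bit : List (List Bool)) (j k : Nat) : Bool := (bit.getD j []).getD k false

-- the scan 'if mat[j][x] > d: valid1 = False; break' computes 'all row entries ≤ d'
def rowAll (mat : List (List Int)) (H j : Nat) (d : Int) : Bool :=
  (List.range H).all (fun x => decide (g mat j x ≤ d))

def colAll (mat : List (List Int)) (W k : Nat) (d : Int) : Bool :=
  (List.range W).all (fun y => decide (g mat y k ≤ d))

-- 'for x in range(h): if mat[j][x] == d: bit[j][x] = True'
def markRow (mat : List (List Int)) (H j : Nat) (d : Int) (bit : List (List Bool)) : List (List Bool) :=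
  (List.range H).foldl (fun b x => if g mat j x = d then bitSet b j x else b) bit

def markCol (mat : List (List Int)) (W k : Nat) (d : Int) (bit : List (List Bool)) : List (List Bool) :=
  (List.range W).foldl (fun b y => if g mat y k = d then bitSet b y k else b) bit

-- one iteration of A's cell loop; none = 'return False'
def stepCell (mat : List (List Int)) (W H j k : Nat) (bit : List (List Bool)) :
    Option (List (List Bool)) :=
  if bitGet bit j k then some bit
  else
    let d := g mat j k
    let valid1 := rowAll mat H j d
    let valid2 := colAll mat W k d
    let bit1 := if valid1 then markRow mat H j d bit else bit
    let bit2 := if valid2 then markCol mat W k d bit1 else bit1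
    if !valid1 && !valid2 then none else some bit2

def check (mat : List (List Int)) (w : Int) (h_ : Int) : Bool :=
  let W := w.toNat
  let H := h_.toNat
  let bit0 : List (List Bool) :=
    (List.range W).foldl (fun b _ => b ++ [(List.range H).foldl (fun t _ => t ++ [false]) []]) []
  ((List.range W).foldl
      (fun st j => (List.range H).foldl (fun st k => st.bind (stepCell mat W H j k)) st)
      (some bit0)).isSome

-- ===== PORT B =====
def listMax (l : List Int) : Int := l.foldl max (l.headD 0)

def check_alt (mat : List (List Int)) (w : Int) (h_ : Int) : Bool :=
  let W := w.toNat
  let H := h_.toNat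
  if W = 0 || H = 0 then true
  else
    let rows := (List.range W).map (fun j => (List.range H).map (fun k => (mat.getD j []).getD k 0))
    let rowMax := rows.map listMax
    let colMax := (List.range H).map (fun k => listMax (rows.map (fun r => r.getD k 0)))
    (List.range W).all (fun j => (List.range H).all (fun k =>
      (decide ((rows.getD j []).getD k 0 = rowMax.getD j 0)) ||
      (decide ((rows.getD j []).getD k 0 = colMax.getD k 0))))

-- ===== PRECONDITION & SPEC =====
-- Pre_check excludes (for h > 0) matrices with fewer than w rows or a row shorter than h among the
-- first w: there A raises IndexError, except when both break-scans of a cell fail before reaching the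
-- missing entry so A returns False first — an accident of scan order; B (reading the whole w×h block) raises there.
def Pre_check (mat : List (List Int)) (w : Int) (h_ : Int) : Prop :=
  0 < h_.toNat → (w.toNat ≤ mat.length ∧ ∀ row ∈ mat.take w.toNat, h_.toNat ≤ row.length)
instance (mat : List (List Int)) (w : Int) (h_ : Int) : Decidable (Pre_check mat w h_) := by
  unfold Pre_check; infer_instance

def pvWitness_check : List (List Int) × Int × Int := ([[1, 2], [3, 4]], 2, 2)

def Spec_check (mat : List (List Int)) (w : Int) (h_ : Int) (out : Bool) : Prop := out = check_alt mat w h_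
instance (mat : List (List Int)) (w : Int) (h_ : Int) (out : Bool) : Decidable (Spec_check mat w h_ out) := by unfold Spec_check; infer_instance

-- ===== CLAIM (what is proved, stated in full; the proofs are below) =====
def Claim_equal_check : Prop := ∀ (mat : List (List Int)) (w : Int) (h_ : Int), Dom_check mat w h_ → Pre_check mat w h_ → Spec_check mat w h_ (check mat w h_)

-- ===== LEMMAS AND PROOFS =====

-- cell (j,k) is a row maximum or a column maximum
def goodB (mat : List (List Int)) (W H j k : Nat) : Bool :=
  rowAll mat H j (g mat j k) || colAll mat W k (g mat j k)

-- invariant of A's bit array: only good cells ever get marked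
def BitInv (mat : List (List Int)) (W H : Nat) (bit : List (List Bool)) : Prop :=
  ∀ j k, bitGet bit j k = true → goodB mat W H j k = true

def cells (W H : Nat) : List (Nat × Nat) :=
  (List.range W).flatMap (fun j => (List.range H).map (fun k => (j, k)))

lemma setRow_getD (r : List Bool) (k k' : Nat) (h : (setRow r k).getD k' false = true) :
    k = k' ∨ r.getD k' false = true := by
  induction r generalizing k k' with
  | nil => simp [setRow] at h
  | cons b bs ih =>
    cases k with
    | zero =>
      cases k' with
      | zero => exact Or.inl rfl
      | succ k' =>
        simp only [setRow, List.getD_cons_succ] at h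
        exact Or.inr (by simpa [List.getD_cons_succ] using h)
    | succ k =>
      cases k' with
      | zero =>
        simp only [setRow, List.getD_cons_zero] at h
        exact Or.inr (by simpa [List.getD_cons_zero] using h)
      | succ k' =>
        simp only [setRow, List.getD_cons_succ] at h
        rcases ih k k' h with h1 | h1
        · exact Or.inl (by omega)
        · exact Or.inr (by simpa [List.getD_cons_succ] using h1)

lemma bitGet_bitSet (bit : List (List Bool)) (j k j' k' : Nat)
    (h : bitGet (bitSet bit j k) j' k' = true) :
    (j = j' ∧ k = k') ∨ bitGet bit j' k' = true := by
  induction bit generalizing j j' with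
  | nil => simp [bitSet, bitGet] at h
  | cons r rs ih =>
    cases j with
    | zero =>
      cases j' with
      | zero =>
        simp only [bitSet, bitGet, List.getD_cons_zero] at h
        rcases setRow_getD r k k' h with h1 | h1
        · exact Or.inl ⟨rfl, h1⟩
        · exact Or.inr (by simpa [bitGet] using h1)
      | succ j' =>
        simp only [bitSet, bitGet, List.getD_cons_succ] at h ⊢
        exact Or.inr h
    | succ j =>
      cases j' with
      | zero =>
        simp only [bitSet, bitGet, List.getD_cons_zero] at h ⊢
        exact Or.inr h
      | succ j' =>
        simp only [bitSet, bitGet, List.getD_cons_succ] at h ⊢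
        rcases ih j j' h with ⟨h1, h2⟩ | h1
        · exact Or.inl ⟨by omega, h2⟩
        · exact Or.inr h1

lemma inv_markRow (mat : List (List Int)) (W H j : Nat) (d : Int)
    (hrow : rowAll mat H j d = true) (bit : List (List Bool)) (hb : BitInv mat W H bit) :
    BitInv mat W H (markRow mat H j d bit) := by
  unfold markRow
  generalize (List.range H) = xs
  induction xs generalizing bit with
  | nil => exact hb
  | cons x xs ih =>
    simp only [List.foldl_cons]
    apply ih
    by_cases hx : g mat j x = d
    · simp only [hx, if_true]
      intro j' k' hget
      rcases bitGet_bitSet bit j x j' k' hget with ⟨hj, hk⟩ | hold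
      · subst hj; subst hk
        unfold goodB
        rw [hx, hrow]
        simp
      · exact hb j' k' hold
    · simp only [if_neg hx]; exact hb

lemma inv_markCol (mat : List (List Int)) (W H k : Nat) (d : Int)
    (hcol : colAll mat W k d = true) (bit : List (List Bool)) (hb : BitInv mat W H bit) :
    BitInv mat W H (markCol mat W k d bit) := by
  unfold markCol
  generalize (List.range W) = ys
  induction ys generalizing bit with
  | nil => exact hb
  | cons y ys ih =>
    simp only [List.foldl_cons]
    apply ih
    by_cases hy : g mat y k = d
    · simp only [hy, if_true]
      intro j' k' hget
      rcases bitGet_bitSet bit y k j' k' hget with ⟨hj, hk⟩ | hold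
      · subst hj; subst hk
        unfold goodB
        rw [hy, hcol]
        simp
      · exact hb j' k' hold
    · simp only [if_neg hy]; exact hb

lemma stepCell_good (mat : List (List Int)) (W H j k : Nat) (bit : List (List Bool))
    (hb : BitInv mat W H bit) (hg : goodB mat W H j k = true) :
    ∃ bit', stepCell mat W H j k bit = some bit' ∧ BitInv mat W H bit' := by
  by_cases hget : bitGet bit j k = true
  · exact ⟨bit, by simp [stepCell, hget], hb⟩
  · unfold goodB at hg
    by_cases h1 : rowAll mat H j (g mat j k) = true <;>
    by_cases h2 : colAll mat W k (g mat j k) = true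
    · exact ⟨markCol mat W k (g mat j k) (markRow mat H j (g mat j k) bit),
        by simp [stepCell, hget, h1, h2],
        inv_markCol mat W H k _ h2 _ (inv_markRow mat W H j _ h1 bit hb)⟩
    · exact ⟨markRow mat H j (g mat j k) bit, by simp [stepCell, hget, h1, h2],
        inv_markRow mat W H j _ h1 bit hb⟩
    · exact ⟨markCol mat W k (g mat j k) bit, by simp [stepCell, hget, h1, h2],
        inv_markCol mat W H k _ h2 bit hb⟩
    · rcases Bool.or_eq_true_iff.mp hg with h | h
      exacts [absurd h h1, absurd h h2]

lemma stepCell_bad (mat : List (List Int)) (W H j k : Nat) (bit : List (List Bool))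
    (hb : BitInv mat W H bit) (hg : goodB mat W H j k = false) :
    stepCell mat W H j k bit = none := by
  have hget : bitGet bit j k = false := by
    by_contra hc
    have := hb j k (by revert hc; cases bitGet bit j k <;> simp)
    rw [hg] at this
    exact absurd this (by simp)
  unfold goodB at hg
  rcases Bool.or_eq_false_iff.mp hg with ⟨h1, h2⟩
  unfold stepCell
  simp [hget, h1, h2]

lemma foldl_bind_none (mat : List (List Int)) (W H : Nat) (cs : List (Nat × Nat)) :
    cs.foldl (fun st c => st.bind (stepCell mat W H c.1 c.2)) none = none := by
  induction cs with
  | nil => rfl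
  | cons c cs ih => simpa using ih

lemma fold_char (mat : List (List Int)) (W H : Nat) (cs : List (Nat × Nat)) :
    ∀ (bit : List (List Bool)), BitInv mat W H bit →
      (cs.foldl (fun st c => st.bind (stepCell mat W H c.1 c.2)) (some bit)).isSome
        = cs.all (fun c => goodB mat W H c.1 c.2) := by
  induction cs with
  | nil => intro bit _; rfl
  | cons c cs ih =>
    intro bit hb
    by_cases hg : goodB mat W H c.1 c.2 = true
    · obtain ⟨bit', hstep, hb'⟩ := stepCell_good mat W H c.1 c.2 bit hb hg
      simp only [List.foldl_cons, List.all_cons, hg, Option.bind_some, hstep, Bool.true_and]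
      exact ih bit' hb'
    · have hg' : goodB mat W H c.1 c.2 = false := by
        revert hg; cases goodB mat W H c.1 c.2 <;> simp
      have hstep := stepCell_bad mat W H c.1 c.2 bit hb hg'
      simp only [List.foldl_cons, List.all_cons, hg', Option.bind_some, hstep, Bool.false_and]
      simp [foldl_bind_none]

lemma nested_foldl_eq (mat : List (List Int)) (W H : Nat) (js : List Nat) :
    ∀ (st : Option (List (List Bool))),
      js.foldl (fun st j => (List.range H).foldl (fun st k => st.bind (stepCell mat W H j k)) st) st
        = (js.flatMap (fun j => (List.range H).map (fun k => (j, k)))).foldl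
            (fun st c => st.bind (stepCell mat W H c.1 c.2)) st := by
  induction js with
  | nil => intro st; rfl
  | cons j js ih =>
    intro st
    simp only [List.foldl_cons, List.flatMap_cons, List.foldl_append, List.foldl_map]
    exact ih _

lemma foldl_snoc_replicate {α : Type} (r : α) (l : List Nat) :
    ∀ (init : List α), l.foldl (fun b _ => b ++ [r]) init = init ++ List.replicate l.length r := by
  induction l with
  | nil => intro init; simp
  | cons a l ih =>
    intro init
    simp only [List.foldl_cons, List.length_cons, ih]
    rw [List.append_assoc, List.singleton_append, ← List.replicate_succ]

lemma getD_replicate_false (m : Nat) : ∀ (k : Nat), (List.replicate m false).getD k false = false := by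
  induction m with
  | zero => intro k; rfl
  | succ m ih =>
    intro k
    cases k with
    | zero => simp [List.replicate_succ]
    | succ k => simp only [List.replicate_succ, List.getD_cons_succ]; exact ih k

lemma bitGet_replicate (m W : Nat) : ∀ j k, bitGet (List.replicate W (List.replicate m false)) j k = false := by
  induction W with
  | zero => intro j k; unfold bitGet; simp
  | succ W ih =>
    intro j k
    cases j with
    | zero =>
      unfold bitGet
      simp only [List.replicate_succ, List.getD_cons_zero]
      exact getD_replicate_false m k
    | succ j =>
      unfold bitGet at ih ⊢
      simp only [List.replicate_succ, List.getD_cons_succ]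
      exact ih j k

lemma check_eq_all (mat : List (List Int)) (w h_ : Int) :
    check mat w h_ = (cells w.toNat h_.toNat).all (fun c => goodB mat w.toNat h_.toNat c.1 c.2) := by
  show ((List.range w.toNat).foldl
      (fun st j => (List.range h_.toNat).foldl (fun st k => st.bind (stepCell mat w.toNat h_.toNat j k)) st)
      (some ((List.range w.toNat).foldl
        (fun b _ => b ++ [(List.range h_.toNat).foldl (fun t _ => t ++ [false]) []]) []))).isSome
    = (cells w.toNat h_.toNat).all (fun c => goodB mat w.toNat h_.toNat c.1 c.2)
  rw [nested_foldl_eq]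
  have hbit0 : (List.range w.toNat).foldl
      (fun b _ => b ++ [(List.range h_.toNat).foldl (fun t _ => t ++ [false]) []]) []
      = List.replicate w.toNat (List.replicate h_.toNat false) := by
    rw [foldl_snoc_replicate, foldl_snoc_replicate]
    simp [List.length_range]
  rw [hbit0]
  exact fold_char mat w.toNat h_.toNat (cells w.toNat h_.toNat) _
    (fun j k h => absurd h (by simp [bitGet_replicate]))

lemma le_foldl_max_init (t : List Int) : ∀ (a : Int), a ≤ t.foldl max a := by
  induction t with
  | nil => intro a; simp
  | cons b t ih =>
    intro a
    simp only [List.foldl_cons]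
    exact le_trans (le_max_left a b) (ih (max a b))

lemma le_foldl_max_mem (t : List Int) : ∀ (a x : Int), x ∈ t → x ≤ t.foldl max a := by
  induction t with
  | nil => intro a x hx; simp at hx
  | cons b t ih =>
    intro a x hx
    simp only [List.foldl_cons]
    rcases List.mem_cons.mp hx with rfl | hx
    · exact le_trans (le_max_right a x) (le_foldl_max_init t _)
    · exact ih _ x hx

lemma foldl_max_mem (t : List Int) : ∀ (a : Int), t.foldl max a = a ∨ t.foldl max a ∈ t := by
  induction t with
  | nil => intro a; exact Or.inl rfl
  | cons b t ih =>
    intro a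
    simp only [List.foldl_cons]
    rcases ih (max a b) with h | h
    · rcases max_choice a b with hm | hm
      · exact Or.inl (h.trans hm)
      · exact Or.inr (List.mem_cons.mpr (Or.inl (h.trans hm)))
    · exact Or.inr (List.mem_cons.mpr (Or.inr h))

lemma listMax_cons (a : Int) (t : List Int) : listMax (a :: t) = t.foldl max a := by
  simp [listMax]

lemma listMax_spec (l : List Int) (hl : l ≠ []) :
    listMax l ∈ l ∧ ∀ x ∈ l, x ≤ listMax l := by
  cases l with
  | nil => exact absurd rfl hl
  | cons a t =>
    rw [listMax_cons]
    constructor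
    · rcases foldl_max_mem t a with h | h
      · rw [h]; exact List.mem_cons_self
      · exact List.mem_cons_of_mem _ h
    · intro x hx
      rcases List.mem_cons.mp hx with rfl | hx
      · exact le_foldl_max_init t x
      · exact le_foldl_max_mem t a x hx

lemma eq_listMax_iff (l : List Int) (v : Int) (hv : v ∈ l) :
    v = listMax l ↔ ∀ x ∈ l, x ≤ v := by
  have hl : l ≠ [] := fun h => by subst h; simp at hv
  obtain ⟨hmem, hle⟩ := listMax_spec l hl
  constructor
  · intro h x hx
    exact h ▸ hle x hx
  · intro h
    exact le_antisymm (hle v hv) (h _ hmem)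

lemma cells_all_iff (W H : Nat) (p : Nat → Nat → Bool) :
    (cells W H).all (fun c => p c.1 c.2) = true ↔ ∀ j < W, ∀ k < H, p j k = true := by
  simp [cells, List.all_eq_true]

-- the common characterisation: every cell is a row maximum or a column maximum
def GoodAll (mat : List (List Int)) (W H : Nat) : Prop :=
  ∀ j < W, ∀ k < H, (∀ x < H, g mat j x ≤ g mat j k) ∨ (∀ y < W, g mat y k ≤ g mat j k)

lemma cells_all_iff_good (mat : List (List Int)) (W H : Nat) :
    (cells W H).all (fun c => goodB mat W H c.1 c.2) = true ↔ GoodAll mat W H := by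
  rw [cells_all_iff]
  unfold GoodAll
  refine forall₂_congr (fun j hj => forall₂_congr (fun k hk => ?_))
  simp [goodB, rowAll, colAll, List.all_eq_true, List.mem_range]

lemma row_case (mat : List (List Int)) (H j k : Nat) (hk : k < H) :
    g mat j k = listMax ((List.range H).map (fun x => g mat j x)) ↔
      ∀ x < H, g mat j x ≤ g mat j k := by
  have hmem : g mat j k ∈ (List.range H).map (fun x => g mat j x) :=
    List.mem_map.mpr ⟨k, List.mem_range.mpr hk, rfl⟩
  rw [eq_listMax_iff _ _ hmem]
  constructor
  · intro h x hx
    exact h _ (List.mem_map.mpr ⟨x, List.mem_range.mpr hx, rfl⟩)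
  · intro h y hy
    obtain ⟨x, hx, rfl⟩ := List.mem_map.mp hy
    exact h x (List.mem_range.mp hx)

lemma col_case (mat : List (List Int)) (W j k : Nat) (hj : j < W) :
    g mat j k = listMax ((List.range W).map (fun y => g mat y k)) ↔
      ∀ y < W, g mat y k ≤ g mat j k := by
  have hmem : g mat j k ∈ (List.range W).map (fun y => g mat y k) :=
    List.mem_map.mpr ⟨j, List.mem_range.mpr hj, rfl⟩
  rw [eq_listMax_iff _ _ hmem]
  constructor
  · intro h y hy
    exact h _ (List.mem_map.mpr ⟨y, List.mem_range.mpr hy, rfl⟩)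
  · intro h v hv
    obtain ⟨y, hy, rfl⟩ := List.mem_map.mp hv
    exact h y (List.mem_range.mp hy)

lemma check_alt_iff (mat : List (List Int)) (w h_ : Int) :
    check_alt mat w h_ = true ↔ GoodAll mat w.toNat h_.toNat := by
  unfold check_alt
  by_cases h0 : w.toNat = 0 ∨ h_.toNat = 0
  · rw [if_pos (by rcases h0 with h | h <;> simp [h])]
    unfold GoodAll
    constructor
    · intro _ j hj k hk
      rcases h0 with h | h <;> omega
    · intro _; rfl
  · rw [not_or] at h0
    rw [if_neg (by simp [h0.1, h0.2])]
    set W := w.toNat with hWdef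
    set H := h_.toNat with hHdef
    have hrows : ∀ j < W, (((List.range W).map (fun j => (List.range H).map (fun k => (mat.getD j []).getD k 0))).getD j [])
        = (List.range H).map (fun k => g mat j k) := by
      intro j hj
      rw [List.getD_eq_getElem _ _ (by simpa using hj)]
      simp [g]
    simp only [List.all_eq_true, List.mem_range, Bool.or_eq_true, decide_eq_true_eq]
    unfold GoodAll
    refine forall₂_congr (fun j hj => forall₂_congr (fun k hk => ?_))
    have hv : ((((List.range W).map (fun j => (List.range H).map (fun k => (mat.getD j []).getD k 0))).getD j []).getD k 0) = g mat j k := by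
      rw [hrows j hj, List.getD_eq_getElem _ _ (by simpa using hk)]
      simp
    have hrmax : (((List.range W).map (fun j => (List.range H).map (fun k => (mat.getD j []).getD k 0))).map listMax).getD j 0
        = listMax ((List.range H).map (fun x => g mat j x)) := by
      rw [List.getD_eq_getElem _ _ (by simpa using hj)]
      simp only [List.getElem_map, List.getElem_range]
      rfl
    have hcmax : (((List.range H).map (fun k => listMax (((List.range W).map (fun j => (List.range H).map (fun k => (mat.getD j []).getD k 0))).map (fun r => r.getD k 0)))).getD k 0)
        = listMax ((List.range W).map (fun y => g mat y k)) := by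
      rw [List.getD_eq_getElem _ _ (by simpa using hk)]
      simp only [List.getElem_map, List.getElem_range, List.map_map]
      congr 1
      refine List.map_congr_left (fun y hy => ?_)
      simp only [Function.comp_apply]
      rw [List.getD_eq_getElem _ _ (by simpa using hk)]
      simp [g]
    rw [hv, hrmax, hcmax]
    exact or_congr (row_case mat H j k hk) (col_case mat W j k hj)

-- ===== VERDICT (by name: the statement is the Claim_ definition above) =====
theorem check_spec : Claim_equal_check := by
  intro mat w h_ _ _
  unfold Spec_check
  rw [check_eq_all, Bool.eq_iff_iff, cells_all_iff_good]
  exact (check_alt_iff mat w h_).symm
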